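-- pv_equiv track=rewrite | github.com/sakura602/test | apt_sequence_builder.py | _categorize_with_flexible_recognition
-- ===== SOURCE A (Python) =====
-- def _categorize_with_flexible_recognition(stage_sequence, allow_repetition=True, allow_skipping=True):
--     """
--     使用灵活的攻击阶段识别进行分类
--
--     参数:
--     stage_sequence: 攻击阶段序列
--     allow_repetition: 是否允许阶段重复
--     allow_skipping: 是否允许阶段跳跃
--
--     返回:
--     APT类别
--     """
--     # 如果序列为空，返回APT5
--     if not stage_sequence:
--         return "APT5"
--
--     # 去除重复阶段（如果不允许重复）
--     if not allow_repetition: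
--         cleaned_sequence = []
--         prev_stage = None
--         for stage in stage_sequence:
--             if stage != prev_stage:
--                 cleaned_sequence.append(stage)
--                 prev_stage = stage
--         stage_sequence = cleaned_sequence
--
--     # 获取序列中的唯一阶段
--     unique_stages = set(stage_sequence)
--
--     # 检查是否包含所有必要的阶段（基于标准标签映射）
--     has_reconnaissance = 1 in unique_stages      # 侦察阶段 (标签1)
--     has_establish_foothold = 2 in unique_stages  # 立足阶段 (标签2)
--     has_lateral_movement = 3 in unique_stages    # 横向移动 (标签3)
--     has_data_exfiltration = 4 in unique_stages   # 数据渗出 (标签4)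
--
--     # 检查阶段顺序（如果不允许跳跃）
--     if not allow_skipping:
--         # 定义期望的阶段顺序（基于标准标签映射）
--         expected_order = [1, 2, 3, 4]  # 侦察 -> 立足 -> 横向移动 -> 数据渗出
--
--         # 检查序列是否按照正确的顺序进行
--         is_ordered = True
--         current_phase_idx = 0
--
--         for stage in stage_sequence:
--             if stage not in expected_order:
--                 continue  # 忽略不在预期顺序中的阶段
--
--             # 找到当前阶段在预期顺序中的位置
--             try:
--                 stage_idx = expected_order.index(stage)
--             except ValueError:
--                 continue  # 如果阶段不在预期顺序中，跳过
--
--             # 如果当前阶段的索引小于之前的索引，说明顺序不对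
--             if stage_idx < current_phase_idx:
--                 is_ordered = False
--                 break
--
--             # 更新当前阶段索引
--             current_phase_idx = max(current_phase_idx, stage_idx)
--
--         if not is_ordered:
--             return "APT5"  # 不规则攻击链
--
--     # 根据包含的阶段进行分类（基于新的标签映射）
--     if has_data_exfiltration and has_lateral_movement and has_establish_foothold and has_reconnaissance:
--         return "APT4"  # 完整攻击链
--     elif has_lateral_movement and has_establish_foothold and has_reconnaissance:
--         return "APT3"  # 侦察+立足+横向移动
--     elif has_establish_foothold and has_reconnaissance:
--         return "APT2"  # 侦察+立足
--     elif has_reconnaissance: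
--         return "APT1"  # 只有侦察阶段
--     else:
--         return "APT5"  # 不规则攻击链
-- ===== SOURCE B (Python) =====
-- def _categorize_with_flexible_recognition(stage_sequence, allow_repetition=True, allow_skipping=True):
--     # B: staged, table-driven rewrite. The consecutive-dedup pass of A is dropped
--     # (it never changes the answer); ordering is checked by comparing the relevant
--     # stages with their sorted copy; the category comes from a 16-entry lookup
--     # table indexed by the bitmask of present stages.
--     relevant = [s for s in stage_sequence if s in (1, 2, 3, 4)]
--     if not allow_skipping and relevant != sorted(relevant):
--         return "APT5"
--     idx = ((1 in relevant)
--            + 2 * (2 in relevant)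
--            + 4 * (3 in relevant)
--            + 8 * (4 in relevant))
--     return ["APT5", "APT1", "APT5", "APT2",
--             "APT5", "APT1", "APT5", "APT3",
--             "APT5", "APT1", "APT5", "APT2",
--             "APT5", "APT1", "APT5", "APT4"][idx]
-- ===== Notes on version B (the rewrite author's own statement) =====
-- stated objective: simpler
-- what changed: B drops A's consecutive-dedup pass (a proved no-op), checks ordering by comparing the stages filtered to {1,2,3,4} with their sorted copy instead of A's index-tracking scan, and replaces the four-branch elif chain by a 16-entry lookup table indexed by the bitmask of present stages.
import Mathlib
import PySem

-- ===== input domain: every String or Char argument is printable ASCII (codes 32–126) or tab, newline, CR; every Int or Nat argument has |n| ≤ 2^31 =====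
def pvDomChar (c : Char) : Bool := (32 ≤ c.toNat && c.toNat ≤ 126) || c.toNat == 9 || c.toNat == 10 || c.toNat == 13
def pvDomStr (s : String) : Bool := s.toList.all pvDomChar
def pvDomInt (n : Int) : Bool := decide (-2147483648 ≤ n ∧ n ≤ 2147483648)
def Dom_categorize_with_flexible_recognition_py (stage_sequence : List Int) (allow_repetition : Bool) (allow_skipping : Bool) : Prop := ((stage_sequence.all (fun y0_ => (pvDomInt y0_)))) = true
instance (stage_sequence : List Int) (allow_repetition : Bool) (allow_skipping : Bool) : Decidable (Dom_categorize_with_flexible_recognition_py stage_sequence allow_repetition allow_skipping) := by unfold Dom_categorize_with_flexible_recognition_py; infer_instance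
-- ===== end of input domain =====

-- B is a simpler, staged, table-driven rewrite: it drops A's consecutive-dedup pass
-- (a behavioural no-op), checks ordering by comparing the filtered stages with their
-- sorted copy, and reads the category from a 16-entry table indexed by the bitmask of
-- present stages.

-- ===== PORT A =====
-- the 'cleaned_sequence'/'prev_stage' dedup loop
def pvDedupA (prev : Option Int) : List Int → List Int
  | [] => []
  | stage :: rest =>
    if prev == some stage then pvDedupA prev rest
    else stage :: pvDedupA (some stage) rest

-- the 'is_ordered'/'current_phase_idx' loop (break modelled by returning false)
def pvCheckOrderA : List Int → Nat → Bool
  | [], _ => true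
  | stage :: rest, cur =>
    if !(([1, 2, 3, 4] : List Int).contains stage) then pvCheckOrderA rest cur
    else
      match PySem.List.index? ([1, 2, 3, 4] : List Int) stage with
      | none => pvCheckOrderA rest cur
      | some stage_idx =>
        if stage_idx < cur then false
        else pvCheckOrderA rest (max cur stage_idx)

def categorize_with_flexible_recognition_py (stage_sequence : List Int) (allow_repetition : Bool) (allow_skipping : Bool) : String :=
  if stage_sequence.isEmpty then "APT5"
  else
    let seq2 := if !allow_repetition then pvDedupA none stage_sequence else stage_sequence
    let unique_stages : PySem.Set Int := PySem.Set.ofList seq2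
    let has_reconnaissance := PySem.Set.contains unique_stages 1
    let has_establish_foothold := PySem.Set.contains unique_stages 2
    let has_lateral_movement := PySem.Set.contains unique_stages 3
    let has_data_exfiltration := PySem.Set.contains unique_stages 4
    if !allow_skipping && !(pvCheckOrderA seq2 0) then "APT5"
    else if has_data_exfiltration && has_lateral_movement && has_establish_foothold && has_reconnaissance then "APT4"
    else if has_lateral_movement && has_establish_foothold && has_reconnaissance then "APT3"
    else if has_establish_foothold && has_reconnaissance then "APT2"
    else if has_reconnaissance then "APT1"
    else "APT5"

-- ===== PORT B =====
def categorize_with_flexible_recognition_py_alt (stage_sequence : List Int) (allow_repetition : Bool) (allow_skipping : Bool) : String :=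
  let relevant := stage_sequence.filter (fun s => ([1, 2, 3, 4] : List Int).contains s)
  -- 'relevant != sorted(relevant)'
  if !allow_skipping && !(relevant == PySem.List.sorted relevant (fun x => x) false) then "APT5"
  else
    -- idx = (1 in relevant) + 2*(2 in relevant) + 4*(3 in relevant) + 8*(4 in relevant)
    let idx : Nat :=
      (if (1 : Int) ∈ relevant then 1 else 0)
      + 2 * (if (2 : Int) ∈ relevant then 1 else 0)
      + 4 * (if (3 : Int) ∈ relevant then 1 else 0)
      + 8 * (if (4 : Int) ∈ relevant then 1 else 0)
    (["APT5", "APT1", "APT5", "APT2",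
      "APT5", "APT1", "APT5", "APT3",
      "APT5", "APT1", "APT5", "APT2",
      "APT5", "APT1", "APT5", "APT4"] : List String).getD idx "APT5"

-- ===== PRECONDITION & SPEC =====
def Spec_categorize_with_flexible_recognition_py (stage_sequence : List Int) (allow_repetition : Bool) (allow_skipping : Bool) (out : String) : Prop := out = categorize_with_flexible_recognition_py_alt stage_sequence allow_repetition allow_skipping
instance (stage_sequence : List Int) (allow_repetition : Bool) (allow_skipping : Bool) (out : String) : Decidable (Spec_categorize_with_flexible_recognition_py stage_sequence allow_repetition allow_skipping out) := by unfold Spec_categorize_with_flexible_recognition_py; infer_instance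

-- ===== CLAIM (what is proved, stated in full; the proofs are below) =====
def Claim_equal_categorize_with_flexible_recognition_py : Prop := ∀ (stage_sequence : List Int) (allow_repetition : Bool) (allow_skipping : Bool), Dom_categorize_with_flexible_recognition_py stage_sequence allow_repetition allow_skipping → Spec_categorize_with_flexible_recognition_py stage_sequence allow_repetition allow_skipping (categorize_with_flexible_recognition_py stage_sequence allow_repetition allow_skipping)

-- ===== LEMMAS AND PROOFS =====

theorem mem_pvDedupA_of_mem {x : Int} : ∀ (l : List Int) (prev : Option Int), x ∈ l → x ∈ pvDedupA prev l ∨ prev = some x := by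
  intro l
  induction l with
  | nil => intro prev h; cases h
  | cons s rest ih =>
    intro prev h
    by_cases hp : prev = some s
    · rw [pvDedupA, if_pos (by simp [hp])]
      rcases List.mem_cons.mp h with h | h
      · right; rw [hp, h]
      · rcases ih prev h with h2 | h2
        · exact Or.inl h2
        · exact Or.inr h2
    · rw [pvDedupA, if_neg (by simp [hp])]
      rcases List.mem_cons.mp h with h | h
      · exact Or.inl (h ▸ List.mem_cons_self ..)
      · rcases ih (some s) h with h2 | h2
        · exact Or.inl (List.mem_cons_of_mem _ h2)
        · exact Or.inl (by simp at h2; rw [h2]; exact List.mem_cons_self ..)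

theorem pvDedupA_subset {x : Int} : ∀ (l : List Int) (prev : Option Int), x ∈ pvDedupA prev l → x ∈ l := by
  intro l
  induction l with
  | nil => intro prev h; simpa [pvDedupA] using h
  | cons s rest ih =>
    intro prev h
    by_cases hp : prev = some s
    · rw [pvDedupA, if_pos (by simp [hp])] at h
      exact List.mem_cons_of_mem _ (ih prev h)
    · rw [pvDedupA, if_neg (by simp [hp])] at h
      rcases List.mem_cons.mp h with h | h
      · exact h ▸ List.mem_cons_self ..
      · exact List.mem_cons_of_mem _ (ih (some s) h)

theorem mem_pvDedupA_none {x : Int} (l : List Int) : x ∈ pvDedupA none l ↔ x ∈ l := by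
  constructor
  · exact pvDedupA_subset l none
  · intro h
    rcases mem_pvDedupA_of_mem l none h with h2 | h2
    · exact h2
    · cases h2

theorem pvCheckOrderA_cons_skip {s : Int} {rest : List Int} {cur : Nat}
    (hs : (([1,2,3,4] : List Int).contains s) = false) :
    pvCheckOrderA (s :: rest) cur = pvCheckOrderA rest cur := by
  rw [pvCheckOrderA, if_pos (by rw [hs]; rfl)]

theorem pvCheckOrderA_cons_rel {s : Int} {rest : List Int} {cur idx : Nat}
    (hs : (([1,2,3,4] : List Int).contains s) = true)
    (hidx : PySem.List.index? ([1,2,3,4] : List Int) s = some idx) :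
    pvCheckOrderA (s :: rest) cur = if idx < cur then false else pvCheckOrderA rest (max cur idx) := by
  rw [pvCheckOrderA, if_neg (by rw [hs]; simp), hidx]

theorem pvIndex?_of_mem {s : Int} (hs : s ∈ ([1,2,3,4] : List Int)) :
    PySem.List.index? ([1,2,3,4] : List Int) s = some ((s - 1).toNat) := by
  fin_cases hs <;> decide

theorem pvCheckOrderA_pvDedupA : ∀ (l : List Int) (prev : Option Int) (cur : Nat),
    (∀ p, prev = some p → ∀ idx, PySem.List.index? ([1,2,3,4] : List Int) p = some idx → idx = cur) →
    pvCheckOrderA (pvDedupA prev l) cur = pvCheckOrderA l cur := by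
  intro l
  induction l with
  | nil => intro prev cur _; rfl
  | cons s rest ih =>
    intro prev cur hinv
    by_cases hp : prev = some s
    · rw [pvDedupA, if_pos (by simp [hp])]
      by_cases hs : (([1,2,3,4] : List Int).contains s) = true
      · have hm : s ∈ ([1,2,3,4] : List Int) := by simpa using hs
        have hidx := pvIndex?_of_mem hm
        have heq : (s - 1).toNat = cur := hinv s hp _ hidx
        rw [pvCheckOrderA_cons_rel hs hidx, if_neg (by omega)]
        have hmax : max cur ((s - 1).toNat) = cur := by omega
        rw [hmax]
        exact ih prev cur hinv
      · rw [pvCheckOrderA_cons_skip (by simpa using hs)]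
        exact ih prev cur hinv
    · rw [pvDedupA, if_neg (by simp [hp])]
      by_cases hs : (([1,2,3,4] : List Int).contains s) = true
      · have hm : s ∈ ([1,2,3,4] : List Int) := by simpa using hs
        have hidx := pvIndex?_of_mem hm
        rw [pvCheckOrderA_cons_rel hs hidx, pvCheckOrderA_cons_rel hs hidx]
        by_cases hlt : (s - 1).toNat < cur
        · rw [if_pos hlt, if_pos hlt]
        · rw [if_neg hlt, if_neg hlt]
          refine ih (some s) (max cur ((s - 1).toNat)) ?_
          intro p hps idx2 hidx2
          obtain rfl : s = p := Option.some.inj hps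
          rw [hidx] at hidx2
          have h3 := Option.some.inj hidx2
          omega
      · have hs' : (([1,2,3,4] : List Int).contains s) = false := by simpa using hs
        rw [pvCheckOrderA_cons_skip hs', pvCheckOrderA_cons_skip hs']
        refine ih (some s) cur ?_
        intro p hps idx2 hidx2
        obtain rfl : s = p := Option.some.inj hps
        rw [(PySem.List.index?_eq_none_iff _ _).mpr (by simpa using hs)] at hidx2
        cases hidx2

theorem pvCheckOrderA_filter : ∀ (l : List Int) (cur : Nat),
    pvCheckOrderA l cur = pvCheckOrderA (l.filter (fun s => ([1, 2, 3, 4] : List Int).contains s)) cur := by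
  intro l
  induction l with
  | nil => intro cur; rfl
  | cons s rest ih =>
    intro cur
    by_cases hs : (([1,2,3,4] : List Int).contains s) = true
    · have hm : s ∈ ([1,2,3,4] : List Int) := by simpa using hs
      have hidx := pvIndex?_of_mem hm
      rw [List.filter_cons_of_pos hs, pvCheckOrderA_cons_rel hs hidx,
        pvCheckOrderA_cons_rel hs hidx]
      by_cases hlt : (s - 1).toNat < cur
      · rw [if_pos hlt, if_pos hlt]
      · rw [if_neg hlt, if_neg hlt]; exact ih _
    · have hs' : (([1,2,3,4] : List Int).contains s) = false := by simpa using hs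
      rw [List.filter_cons_of_neg (by simpa using hs), pvCheckOrderA_cons_skip hs']
      exact ih cur

theorem pvCheckOrderA_chain_aux : ∀ (rest : List Int) (s : Int), s ∈ ([1,2,3,4] : List Int) →
    (∀ x ∈ rest, x ∈ ([1,2,3,4] : List Int)) →
    (pvCheckOrderA rest (s - 1).toNat = true ↔ List.IsChain (· ≤ ·) (s :: rest)) := by
  intro rest
  induction rest with
  | nil => intro s _ _; simp [pvCheckOrderA]
  | cons t r ih =>
    intro s hs hall
    have ht : t ∈ ([1,2,3,4] : List Int) := hall t (List.mem_cons_self ..)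
    have hidx := pvIndex?_of_mem ht
    rw [pvCheckOrderA_cons_rel (by simpa using ht) hidx]
    by_cases hlt : (t - 1).toNat < (s - 1).toNat
    · rw [if_pos hlt]
      have hst : ¬ (s ≤ t) := by fin_cases hs <;> fin_cases ht <;> omega
      simp [List.isChain_cons_cons, hst]
    · rw [if_neg hlt]
      have hst : s ≤ t := by fin_cases hs <;> fin_cases ht <;> omega
      have hmax : max ((s-1).toNat) ((t-1).toNat) = (t-1).toNat := by omega
      rw [hmax, ih t ht (fun x hx => hall x (List.mem_cons_of_mem _ hx))]
      simp [List.isChain_cons_cons, hst]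

theorem pvCheckOrderA_chain : ∀ (l : List Int), (∀ x ∈ l, x ∈ ([1,2,3,4] : List Int)) →
    (pvCheckOrderA l 0 = true ↔ List.IsChain (· ≤ ·) l) := by
  intro l hall
  cases l with
  | nil => simp [pvCheckOrderA]
  | cons s rest =>
    have hs : s ∈ ([1,2,3,4] : List Int) := hall s (List.mem_cons_self ..)
    have hidx := pvIndex?_of_mem hs
    rw [pvCheckOrderA_cons_rel (by simpa using hs) hidx, if_neg (by omega)]
    have hmax : max 0 ((s-1).toNat) = (s-1).toNat := by omega
    rw [hmax]
    exact pvCheckOrderA_chain_aux rest s hs (fun x hx => hall x (List.mem_cons_of_mem _ hx))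

theorem eq_sorted_iff_chain (l : List Int) :
    (l = PySem.List.sorted l (fun x => x) false) ↔ List.IsChain (· ≤ ·) l := by
  rw [List.isChain_iff_pairwise]
  constructor
  · intro h
    have := PySem.List.sorted_pairwise (xs := l) (key := fun x => x)
    rw [← h] at this
    exact this
  · intro h
    have h2 : l.Pairwise (fun a b => (fun x : Int => x) a ≤ (fun x : Int => x) b) := h
    exact (PySem.List.sorted_eq_self_of_pairwise l (fun x => x) h2).symm

theorem set_contains_ofList (l : List Int) (x : Int) : PySem.Set.contains (PySem.Set.ofList l) x = decide (x ∈ l) := by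
  simp [PySem.Set.contains]

theorem mem_filter_rel {x : Int} (hx : x ∈ ([1,2,3,4] : List Int)) (l : List Int) :
    x ∈ l.filter (fun s => ([1, 2, 3, 4] : List Int).contains s) ↔ x ∈ l := by
  rw [List.mem_filter]
  constructor
  · exact fun h => h.1
  · exact fun h => ⟨h, by simpa using hx⟩

-- ===== VERDICT (by name: the statement is the Claim_ definition above) =====
theorem categorize_with_flexible_recognition_py_spec : Claim_equal_categorize_with_flexible_recognition_py := by
  unfold Claim_equal_categorize_with_flexible_recognition_py
  intro seq ar ak _
  unfold Spec_categorize_with_flexible_recognition_py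
  by_cases hE : seq.isEmpty
  · obtain rfl : seq = [] := List.isEmpty_iff.mp hE
    cases ar <;> cases ak <;> rfl
  · have hE' : seq.isEmpty = false := by simpa using hE
    set rel := seq.filter (fun s => ([1, 2, 3, 4] : List Int).contains s) with hrel
    set seq2 := if !ar then pvDedupA none seq else seq with hseq2
    have hmem : ∀ x : Int, x ∈ ([1,2,3,4] : List Int) → ((x ∈ seq2) ↔ (x ∈ rel)) := by
      intro x hx
      rw [mem_filter_rel hx]
      rw [hseq2]
      cases ar
      · simp only [Bool.not_false, if_pos rfl]
        exact mem_pvDedupA_none seq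
      · simp
    have hrelmem : ∀ x ∈ rel, x ∈ ([1,2,3,4] : List Int) := by
      intro x hx; simpa using (List.mem_filter.mp hx).2
    have hord : pvCheckOrderA seq2 0 = (rel == PySem.List.sorted rel (fun x => x) false) := by
      have h1 : pvCheckOrderA seq2 0 = pvCheckOrderA seq 0 := by
        rw [hseq2]
        cases ar
        · simp only [Bool.not_false, if_pos rfl]
          exact pvCheckOrderA_pvDedupA seq none 0 (by intro p hp; cases hp)
        · simp
      rw [Bool.eq_iff_iff, h1, pvCheckOrderA_filter, ← hrel,
        pvCheckOrderA_chain rel hrelmem, ← eq_sorted_iff_chain, beq_iff_eq]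
    rw [categorize_with_flexible_recognition_py, categorize_with_flexible_recognition_py_alt]
    rw [if_neg (by rw [hE']; simp)]
    simp only [← hrel, ← hseq2, set_contains_ofList, hord]
    have hd : ∀ x : Int, x ∈ ([1,2,3,4] : List Int) → decide (x ∈ seq2) = decide (x ∈ rel) :=
      fun x hx => decide_eq_decide.mpr (hmem x hx)
    rw [hd 1 (by decide), hd 2 (by decide), hd 3 (by decide), hd 4 (by decide)]
    by_cases hC : (!ak && !(rel == PySem.List.sorted rel (fun x => x) false)) = true
    · rw [if_pos hC, if_pos hC]
    · rw [if_neg hC, if_neg hC]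
      by_cases h1 : (1 : Int) ∈ rel <;> by_cases h2 : (2 : Int) ∈ rel <;>
        by_cases h3 : (3 : Int) ∈ rel <;> by_cases h4 : (4 : Int) ∈ rel <;>
        simp [h1, h2, h3, h4, List.getD]
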